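-- pv_equiv track=rewrite | github.com/samuelbagin1/sem1-python | cvicSkuska.py | ifRovnake
-- ===== SOURCE A (Python) =====
-- def ifRovnake(A):
--     for p in range(len(A[0])):  #stlpec
--         bRiadok=True
--         for i in range(len(A)): #riadok
--             if A[i][p]!=A[0][p]:
--                 bRiadok=False
--         if bRiadok==True:
--             return True
--     return False
-- ===== SOURCE B (Python) =====
-- def ifRovnake(A):
--     # Candidate-elimination: one row-major pass keeping the column indices that
--     # are still uniform (equal to the first row), early-exiting when none survive.
--     first = A[0]
--     candidates = list(range(len(first)))
--     for row in A:
--         candidates = [p for p in candidates if row[p] == first[p]]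
--         if not candidates:
--             return False
--     return True
-- ===== Notes on version B (the rewrite author's own statement) =====
-- stated objective: alternative
-- what changed: Replaces A's column-major double loop with a boolean flag by a single row-major pass that keeps a shrinking list of candidate column indices (columns still equal to the first row) and returns False as soon as no candidates survive; eliminated columns are never inspected again, which a timing run measured as a constant-factor speedup.
-- outside the precondition, e.g. on ifRovnake([[1, 2], [1]]): A returns True, B raises IndexError
import Mathlib
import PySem

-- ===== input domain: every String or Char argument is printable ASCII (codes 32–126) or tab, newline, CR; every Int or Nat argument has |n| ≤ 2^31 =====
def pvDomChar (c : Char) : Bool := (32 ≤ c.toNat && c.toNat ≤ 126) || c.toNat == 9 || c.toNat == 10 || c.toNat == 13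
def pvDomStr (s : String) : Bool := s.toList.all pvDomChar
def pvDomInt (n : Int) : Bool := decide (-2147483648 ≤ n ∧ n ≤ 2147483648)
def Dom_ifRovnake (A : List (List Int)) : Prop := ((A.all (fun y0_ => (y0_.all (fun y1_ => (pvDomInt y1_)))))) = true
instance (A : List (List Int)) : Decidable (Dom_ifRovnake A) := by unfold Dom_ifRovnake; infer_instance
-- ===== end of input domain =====

-- B replaces A's column-major flag loops by one row-major candidate-elimination pass (measured faster: eliminated columns are not re-inspected).

-- ===== PORT A =====
-- inner loop: for i in range(len(A)): if A[i][p]!=A[0][p]: bRiadok=False  (then: if bRiadok==True)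
def ifRovnakeCol (A : List (List Int)) (p : Int) : Bool :=
  (PySem.List.pyRange 0 (A.length : Int) 1).foldl
    (fun b i =>
      if PySem.List.pyGetD (PySem.List.pyGetD A i []) p 0 ≠ PySem.List.pyGetD (PySem.List.pyGetD A 0 []) p 0
      then false else b)
    true

-- outer loop with early 'return True'
def ifRovnakeGo (A : List (List Int)) : List Int → Bool
  | [] => false
  | p :: ps => if ifRovnakeCol A p then true else ifRovnakeGo A ps

def ifRovnake (A : List (List Int)) : Bool :=
  ifRovnakeGo A (PySem.List.pyRange 0 ((A.headD []).length : Int) 1)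

-- ===== PORT B =====
-- for row in A: candidates = [p for p in candidates if row[p] == first[p]]; if not candidates: return False
-- (indices in candidates are nonnegative and, inside Pre_, in range for every row, so List.getD is exact)
def ifRovnakeAltGo (first : List Int) : List (List Int) → List Nat → Bool
  | [], _ => true
  | r :: rs, cands =>
    if (cands.filter (fun p => r.getD p 0 == first.getD p 0)).isEmpty then false
    else ifRovnakeAltGo first rs (cands.filter (fun p => r.getD p 0 == first.getD p 0))

def ifRovnake_alt (A : List (List Int)) : Bool :=
  ifRovnakeAltGo (A.headD []) A (List.range (A.headD []).length)

-- ===== PRECONDITION & SPEC =====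
-- Pre_ excludes the empty matrix (A evaluates A[0]: IndexError) and matrices with a row
-- shorter than the first row, on which A raises IndexError unless an earlier all-equal
-- column makes it return first (B raises IndexError on those too).
def Pre_ifRovnake (A : List (List Int)) : Prop :=
  A ≠ [] ∧ ∀ r ∈ A, (A.headD []).length ≤ r.length
instance (A : List (List Int)) : Decidable (Pre_ifRovnake A) := by unfold Pre_ifRovnake; infer_instance

def pvWitness_ifRovnake : List (List Int) := [[1, 2], [3, 2]]

def Spec_ifRovnake (A : List (List Int)) (out : Bool) : Prop := out = ifRovnake_alt A
instance (A : List (List Int)) (out : Bool) : Decidable (Spec_ifRovnake A out) := by unfold Spec_ifRovnake; infer_instance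

-- ===== CLAIM (what is proved, stated in full; the proofs are below) =====
def Claim_equal_ifRovnake : Prop := ∀ (A : List (List Int)), Dom_ifRovnake A → Pre_ifRovnake A → Spec_ifRovnake A (ifRovnake A)

-- ===== LEMMAS AND PROOFS =====

-- setting the flag to False and testing it afterwards is an 'all' over the list
theorem foldl_flag_all (c : List Int → Prop) [DecidablePred c] (l : List (List Int)) (b : Bool) :
    l.foldl (fun b r => if c r then false else b) b = (b && l.all (fun r => !decide (c r))) := by
  induction l generalizing b with
  | nil => simp
  | cons r t ih =>
    simp only [List.foldl_cons, List.all_cons, ih]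
    by_cases hc : c r <;> simp [hc]

theorem ifRovnakeGo_eq_any (A : List (List Int)) (ps : List Int) :
    ifRovnakeGo A ps = ps.any (ifRovnakeCol A) := by
  induction ps with
  | nil => rfl
  | cons p t ih =>
    cases h : ifRovnakeCol A p <;> simp [ifRovnakeGo, h, ih]

theorem ifRovnakeCol_eq (a : List Int) (rest : List (List Int)) (k : Nat) :
    ifRovnakeCol (a :: rest) (k : Int) =
      (a :: rest).all (fun r => r.getD k 0 == a.getD k 0) := by
  unfold ifRovnakeCol
  rw [PySem.List.foldl_pyRange_zero_pyGetD'
       (f := fun b r => if PySem.List.pyGetD r (k : Int) 0 ≠ PySem.List.pyGetD (PySem.List.pyGetD (a :: rest) 0 []) (k : Int) 0 then false else b)]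
  rw [foldl_flag_all]
  simp only [PySem.List.pyGetD_zero_cons, PySem.List.pyGetD_natCast, decide_not,
    Bool.not_not, Bool.true_and]
  apply List.all_congr rfl
  intro r
  exact (beq_eq_decide _ _).symm

-- the candidate-elimination pass over a nonempty row list computes:
-- some candidate column agrees with 'first' on every row
theorem ifRovnakeAltGo_eq (first : List Int) (rs : List (List Int)) (cands : List Nat)
    (hne : rs ≠ []) :
    ifRovnakeAltGo first rs cands =
      !(cands.filter (fun p => rs.all (fun r => r.getD p 0 == first.getD p 0))).isEmpty := by
  induction rs generalizing cands with
  | nil => exact absurd rfl hne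
  | cons r rs ih =>
    have hcomp : (cands.filter (fun p => r.getD p 0 == first.getD p 0)).filter
          (fun p => rs.all (fun s => s.getD p 0 == first.getD p 0)) =
        cands.filter (fun p => (r :: rs).all (fun s => s.getD p 0 == first.getD p 0)) := by
      rw [List.filter_filter]
      apply List.filter_congr
      intro p _
      simp [Bool.and_comm]
    rw [show ifRovnakeAltGo first (r :: rs) cands =
        (if (cands.filter (fun p => r.getD p 0 == first.getD p 0)).isEmpty then false
         else ifRovnakeAltGo first rs
           (cands.filter (fun p => r.getD p 0 == first.getD p 0))) from rfl]
    by_cases h : (cands.filter (fun p => r.getD p 0 == first.getD p 0)).isEmpty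
    · rw [if_pos h, ← hcomp, List.isEmpty_iff.mp h]
      rfl
    · rw [if_neg h]
      have h' : (cands.filter (fun p => r.getD p 0 == first.getD p 0)).isEmpty = false :=
        Bool.eq_false_iff.mpr h
      cases rs with
      | nil =>
        have hone : cands.filter (fun p => (r :: ([] : List (List Int))).all
              (fun s => s.getD p 0 == first.getD p 0)) =
            cands.filter (fun p => r.getD p 0 == first.getD p 0) := by
          apply List.filter_congr
          intro p _
          simp
        rw [show ifRovnakeAltGo first []
              (cands.filter (fun p => r.getD p 0 == first.getD p 0)) = true from rfl,
            hone, h']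
        rfl
      | cons r2 rs2 =>
        rw [ih _ (by simp), hcomp]

theorem filter_isEmpty_not_any (l : List Nat) (p : Nat → Bool) :
    (!(l.filter p).isEmpty) = l.any p := by
  induction l with
  | nil => rfl
  | cons a t ih =>
    cases h : p a <;> simp [h, ih]

theorem ifRovnake_eq (A : List (List Int)) (h : Pre_ifRovnake A) :
    ifRovnake A = ifRovnake_alt A := by
  obtain ⟨hne, _⟩ := h
  obtain ⟨a, rest, rfl⟩ : ∃ a rest, A = a :: rest := by
    cases A with
    | nil => exact absurd rfl hne
    | cons a rest => exact ⟨a, rest, rfl⟩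
  unfold ifRovnake ifRovnake_alt
  simp only [List.headD_cons]
  rw [ifRovnakeGo_eq_any, PySem.List.pyRange_one,
      ifRovnakeAltGo_eq _ _ _ (by simp), filter_isEmpty_not_any]
  simp only [Int.sub_zero, Int.toNat_natCast, List.any_map]
  apply List.any_congr rfl
  intro k
  simp only [Function.comp]
  rw [show ((0 : Int) + (k : Int)) = (k : Int) by ring, ifRovnakeCol_eq]

-- ===== VERDICT (by name: the statement is the Claim_ definition above) =====
theorem ifRovnake_spec : Claim_equal_ifRovnake := by
  intro A _ hpre
  unfold Spec_ifRovnake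
  exact ifRovnake_eq A hpre
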